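-- pv_equiv track=rewrite | github.com/dinhhieuac/codeAi | GridStep/strategy_grid_step_v5.py | _calc_streak
-- ===== SOURCE A (Python) =====
-- def _calc_streak(closed):
--     win_streak = 0
--     loss_streak = 0
--     for tr in closed:
--         if tr["net_profit"] > 0:
--             if loss_streak == 0:
--                 win_streak += 1
--             else:
--                 break
--         else:
--             if win_streak == 0:
--                 loss_streak += 1
--             else:
--                 break
--     return win_streak, loss_streak
-- ===== SOURCE B (Python) =====
-- def _calc_streak(closed):
--     # Fold back-to-front: (w, l) is the leading win/loss streak of the suffix
--     # already processed; prepending a trade either extends its side or resets.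
--     w = l = 0
--     for tr in reversed(closed):
--         if tr["net_profit"] > 0:
--             w, l = w + 1, 0
--         else:
--             w, l = 0, l + 1
--     return w, l
-- ===== Notes on version B (the rewrite author's own statement) =====
-- stated objective: alternative
-- what changed: Replaces A's forward scan with two counters and conditional breaks by a backward fold over reversed(closed): going right-to-left, a winning trade extends the win streak and resets the loss streak (and symmetrically), so after the whole fold the pair is exactly the leading streak of the list; no break is needed.
-- outside the precondition, e.g. on _calc_streak([{'net_profit': 1}, {'net_profit': -1}, {}]): A returns (1, 0), B raises KeyError
import Mathlib
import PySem

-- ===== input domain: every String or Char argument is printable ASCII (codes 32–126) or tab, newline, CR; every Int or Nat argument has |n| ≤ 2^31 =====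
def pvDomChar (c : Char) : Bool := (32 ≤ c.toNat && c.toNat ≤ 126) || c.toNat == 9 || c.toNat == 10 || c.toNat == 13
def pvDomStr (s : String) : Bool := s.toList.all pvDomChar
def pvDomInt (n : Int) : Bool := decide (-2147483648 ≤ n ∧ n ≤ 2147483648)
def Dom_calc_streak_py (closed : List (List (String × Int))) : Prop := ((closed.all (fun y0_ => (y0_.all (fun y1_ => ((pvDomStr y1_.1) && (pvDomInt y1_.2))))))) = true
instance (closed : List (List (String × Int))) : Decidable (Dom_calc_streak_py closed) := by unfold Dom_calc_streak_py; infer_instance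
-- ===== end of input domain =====

-- B replaces A's forward two-counter loop with conditional breaks by a backward fold over
-- the reversed list (extend-or-reset per trade); same O(n) cost, different traversal.

-- ===== PORT A =====
-- tr["net_profit"]: first-match association-list lookup; `.getD 0` is only a totalisation
-- default — Pre_ restricts to inputs where the key is present wherever the Python reads it.
def pvGetNP : List (String × Int) → Option Int
  | [] => none
  | (k, v) :: rest => if k = "net_profit" then some v else pvGetNP rest

def pvGoA : List (List (String × Int)) → Int → Int → Int × Int
  | [], w, l => (w, l)
  | tr :: rest, w, l =>
    if 0 < (pvGetNP tr).getD 0 then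
      (if l = 0 then pvGoA rest (w + 1) l else (w, l))
    else
      (if w = 0 then pvGoA rest w (l + 1) else (w, l))

def calc_streak_py (closed : List (List (String × Int))) : Int × Int :=
  pvGoA closed 0 0

-- ===== PORT B =====
-- loop body of `for tr in reversed(closed)`: extend one side, reset the other
def pvStepB (acc : Int × Int) (tr : List (String × Int)) : Int × Int :=
  if 0 < (pvGetNP tr).getD 0 then (acc.1 + 1, 0) else (0, acc.2 + 1)

def calc_streak_py_alt (closed : List (List (String × Int))) : Int × Int :=
  closed.reverse.foldl pvStepB (0, 0)

-- ===== PRECONDITION & SPEC =====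
-- Pre_ excludes inputs where some trade dict lacks the key "net_profit": Python A raises
-- KeyError when it reaches such a trade, and B raises KeyError whenever any trade lacks it.
-- This is slightly narrower than A's domain (A returns if it breaks before a keyless trade,
-- where B raises), stated in claim.json "cites".
def Pre_calc_streak_py (closed : List (List (String × Int))) : Prop :=
  ∀ tr ∈ closed, tr.any (fun p => p.1 = "net_profit") = true
instance (closed : List (List (String × Int))) : Decidable (Pre_calc_streak_py closed) := by
  unfold Pre_calc_streak_py; infer_instance

def pvWitness_calc_streak_py : (List (List (String × Int))) :=
  [[("net_profit", 5)], [("net_profit", -2)]]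

def Spec_calc_streak_py (closed : List (List (String × Int))) (out : Int × Int) : Prop := out = calc_streak_py_alt closed
instance (closed : List (List (String × Int))) (out : Int × Int) : Decidable (Spec_calc_streak_py closed out) := by unfold Spec_calc_streak_py; infer_instance

-- ===== CLAIM (what is proved, stated in full; the proofs are below) =====
def Claim_equal_calc_streak_py : Prop := ∀ (closed : List (List (String × Int))), Dom_calc_streak_py closed → Pre_calc_streak_py closed → Spec_calc_streak_py closed (calc_streak_py closed)

-- ===== LEMMAS AND PROOFS =====
-- whether a trade counts as a win
def pvWin (tr : List (String × Int)) : Bool := decide (0 < (pvGetNP tr).getD 0)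

-- length of the leading run of trades whose win-flag equals b
def pvRun (b : Bool) : List (List (String × Int)) → Int
  | [] => 0
  | tr :: rest => if pvWin tr = b then 1 + pvRun b rest else 0

-- B's backward fold computes exactly the pair of leading run lengths.
theorem pvB_run (l : List (List (String × Int))) :
    l.reverse.foldl pvStepB (0, 0) = (pvRun true l, pvRun false l) := by
  rw [List.foldl_reverse]
  induction l with
  | nil => simp [pvRun]
  | cons tr rest ih =>
    by_cases h : 0 < (pvGetNP tr).getD 0
    · have hw : pvWin tr = true := by simp [pvWin, h]
      simp only [List.foldr_cons]
      rw [ih]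
      simp [pvStepB, h, pvRun, hw]
      ring
    · have hw : pvWin tr = false := by simp [pvWin, h]
      simp only [List.foldr_cons]
      rw [ih]
      simp [pvStepB, h, pvRun, hw]
      ring

-- After a first winning trade, A keeps counting wins until the first non-win, then stops.
theorem pvGoA_win (l : List (List (String × Int))) :
    ∀ w : Int, 0 < w → pvGoA l w 0 = (w + pvRun true l, 0) := by
  induction l with
  | nil => intro w _; simp [pvGoA, pvRun]
  | cons tr rest ih =>
    intro w hw
    by_cases h : 0 < (pvGetNP tr).getD 0
    · have hs : pvWin tr = true := by simp [pvWin, h]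
      rw [pvGoA]
      simp only [h, if_pos]
      rw [ih (w + 1) (by omega)]
      simp [hs, pvRun]
      ring
    · have hs : pvWin tr = false := by simp [pvWin, h]
      rw [pvGoA]
      simp only [h, if_false]
      have : ¬ (w = 0) := by omega
      simp [this, hs, pvRun]

-- Symmetrically, after a first losing trade A counts losses until the first win.
theorem pvGoA_loss (l : List (List (String × Int))) :
    ∀ ls : Int, 0 < ls → pvGoA l 0 ls = (0, ls + pvRun false l) := by
  induction l with
  | nil => intro ls _; simp [pvGoA, pvRun]
  | cons tr rest ih =>
    intro ls hls
    by_cases h : 0 < (pvGetNP tr).getD 0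
    · have hs : pvWin tr = true := by simp [pvWin, h]
      rw [pvGoA]
      have : ¬ (ls = 0) := by omega
      simp [h, this, hs, pvRun]
    · have hs : pvWin tr = false := by simp [pvWin, h]
      rw [pvGoA]
      simp only [h, if_false, if_pos]
      rw [ih (ls + 1) (by omega)]
      simp [hs, pvRun]
      ring

-- ===== VERDICT (by name: the statement is the Claim_ definition above) =====
theorem calc_streak_py_spec : Claim_equal_calc_streak_py := by
  intro closed _ _
  unfold Spec_calc_streak_py calc_streak_py calc_streak_py_alt
  rw [pvB_run]
  cases closed with
  | nil => simp [pvGoA, pvRun]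
  | cons tr rest =>
    by_cases h : 0 < (pvGetNP tr).getD 0
    · have hs : pvWin tr = true := by simp [pvWin, h]
      rw [pvGoA, if_pos h, if_pos rfl, show (0:Int)+1 = 1 by norm_num,
        pvGoA_win rest 1 one_pos]
      simp [hs, pvRun]
    · have hs : pvWin tr = false := by simp [pvWin, h]
      rw [pvGoA, if_neg h, if_pos rfl, show (0:Int)+1 = 1 by norm_num,
        pvGoA_loss rest 1 one_pos]
      simp [hs, pvRun]
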